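-- pv_equiv track=rewrite | github.com/OH-Neuri/Algorithm-Solving | 프로그래머스/2/42587. 프로세스/프로세스.py | solution
-- ===== SOURCE A (Python) =====
-- from collections import deque
--
-- def solution(priorities, location):
--     answer = 0
--     q = deque()
--     for i, v in enumerate(priorities):
--         if i==location:
--             q.append((v,1))
--         else:
--             q.append((v,0))
--
--     if len(q) == 1:
--         return 1
--
--     while q:
--         max_value = max(q)[0]
--         curr, l = q.popleft()
--         # 우선순위가 가장 높은 경우
--         if curr == max_value:
--             # 우선순위 갱신
--             if q:
--                 max_value = max(q)[0]
--             answer += 1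
--             if l == 1:
--                 break
--         else:
--             q.append((curr,l))
--
--     return answer
-- ===== SOURCE B (Python) =====
-- from collections import deque
--
-- def solution(priorities, location):
--     # One pre-computed descending sort replaces A's repeated max() scans:
--     # the k-th process executed always has priority order[k].
--     order = sorted(priorities, reverse=True)
--     q = deque((p, i == location) for i, p in enumerate(priorities))
--     k = 0
--     while q:
--         p, is_target = q.popleft()
--         if p == order[k]:
--             k += 1
--             if is_target:
--                 break
--         else:
--             q.append((p, is_target))
--     return k
-- ===== Notes on version B (the rewrite author's own statement) =====
-- stated objective: faster
-- what changed: B pre-sorts the priorities once (descending) and compares the queue front against order[k] (the priority that must be executed k-th), replacing A's O(n) max() rescan of the whole deque on every iteration; the counter k doubles as the answer, so A's flag-encoded answer bookkeeping and len==1 shortcut disappear.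
import Mathlib
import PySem

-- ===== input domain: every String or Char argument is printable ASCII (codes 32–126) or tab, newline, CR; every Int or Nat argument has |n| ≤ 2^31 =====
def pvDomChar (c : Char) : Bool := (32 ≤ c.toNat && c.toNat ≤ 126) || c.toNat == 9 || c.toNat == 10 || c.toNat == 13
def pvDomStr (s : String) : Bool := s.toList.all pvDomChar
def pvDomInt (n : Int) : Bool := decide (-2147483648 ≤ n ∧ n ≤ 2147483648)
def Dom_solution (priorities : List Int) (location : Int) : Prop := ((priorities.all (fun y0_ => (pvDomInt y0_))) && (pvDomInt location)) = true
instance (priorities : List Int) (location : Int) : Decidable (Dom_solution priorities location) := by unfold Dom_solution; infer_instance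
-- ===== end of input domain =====

-- B pre-sorts the priorities once (descending) and compares the queue front with order[k],
-- the priority that must run k-th, instead of A's max() rescan of the deque every iteration.

-- ===== PORT A =====
-- Shared termination machinery for the rotating-queue loop: the measure
-- len*(len+1) + (index of the first maximal element) strictly decreases on
-- every iteration (a pop shrinks the length, a rotation moves the first max forward).

-- index of the first occurrence of the maximum of the list (0 on [])
def firstMaxIdx : List Int → Nat
  | [] => 0
  | a :: rest => if rest.foldl max a ≤ a then 0 else firstMaxIdx rest + 1

def qMeasure (l : List Int) : Nat := l.length * (l.length + 1) + firstMaxIdx l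

theorem firstMaxIdx_le (l : List Int) : firstMaxIdx l ≤ l.length := by
  induction l with
  | nil => simp [firstMaxIdx]
  | cons a rest ih => by_cases h : rest.foldl max a ≤ a <;> simp [firstMaxIdx, h] <;> omega

theorem foldl_max_shift (t : List Int) : ∀ x y : Int, t.foldl max (max x y) = max x (t.foldl max y) := by
  induction t with
  | nil => intro x y; rfl
  | cons a t ih =>
    intro x y
    simp only [List.foldl_cons]
    rw [max_assoc, ih]

theorem firstMaxIdx_append_le (c : Int) :
    ∀ l : List Int, c < l.foldl max c → firstMaxIdx (l ++ [c]) ≤ firstMaxIdx l := by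
  intro l
  induction l with
  | nil => intro h; simp at h
  | cons a t ih =>
    intro h
    have hA : c < t.foldl max a := by
      have h1 : (a :: t).foldl max c = max c (t.foldl max a) := by
        simp only [List.foldl_cons]
        rw [show max c a = max c (max a a) by simp, foldl_max_shift, foldl_max_shift]
        simp [max_eq_right (PySem.List.le_foldl_max t a).1]
      rw [h1] at h
      rcases lt_max_iff.mp h with h' | h' <;> omega
    simp only [List.cons_append, firstMaxIdx, List.foldl_append, List.foldl_cons, List.foldl_nil]
    rw [max_eq_left (le_of_lt hA)]
    by_cases hcond : t.foldl max a ≤ a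
    · simp [hcond]
    · simp only [hcond, if_false]
      have ht : c < t.foldl max c := by
        have hmem := PySem.List.foldl_max_mem t a
        have hlt : a < t.foldl max a := by omega
        rcases hmem with hm | hm
        · omega
        · have := (PySem.List.le_foldl_max t c).2 _ hm
          omega
      exact Nat.add_le_add_right (ih ht) 1

theorem qMeasure_tail_lt (a : Int) (l : List Int) : qMeasure l < qMeasure (a :: l) := by
  have h1 := firstMaxIdx_le l
  simp only [qMeasure, List.length_cons]
  nlinarith

theorem qMeasure_rot_lt (c : Int) (l : List Int) (h : c < l.foldl max c) :
    qMeasure (l ++ [c]) < qMeasure (c :: l) := by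
  have h1 := firstMaxIdx_append_le c l h
  have h2 : firstMaxIdx (c :: l) = firstMaxIdx l + 1 := by
    simp only [firstMaxIdx]
    rw [if_neg (by omega)]
  simp only [qMeasure, List.length_append, List.length_cons, List.length_nil, Nat.zero_add, h2]
  omega

-- max(q) on a nonempty deque of pairs is lexicographic; its first component is the
-- running max of the first components (A only ever uses max(q)[0]).
theorem max2_cons_cons (c x : Int × Int) (t : List (Int × Int)) :
    PySem.List.max2? (c :: x :: t) Prod.fst Prod.snd =
    PySem.List.max2?
      ((if (decide (c.1 < x.1) || (!decide (x.1 < c.1) && decide (c.2 < x.2))) = true then x else c) :: t)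
      Prod.fst Prod.snd := by
  cases h : (decide (c.1 < x.1) || (!decide (x.1 < c.1) && decide (c.2 < x.2))) with
  | false =>
    simp at h
    simp [PySem.List.max2?, List.foldl_cons]
    rw [if_neg (by omega)]
  | true =>
    simp at h
    simp [PySem.List.max2?, List.foldl_cons]
    rw [if_pos (by omega)]

theorem max2_fst (rest : List (Int × Int)) : ∀ c : Int × Int,
    ∃ m, PySem.List.max2? (c :: rest) Prod.fst Prod.snd = some m ∧
      m.1 = (rest.map Prod.fst).foldl max c.1 := by
  induction rest with
  | nil => intro c; exact ⟨c, rfl, rfl⟩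
  | cons x t ih =>
    intro c
    rw [max2_cons_cons]
    by_cases hcond : (decide (c.1 < x.1) || (!decide (x.1 < c.1) && decide (c.2 < x.2))) = true
    · rw [if_pos hcond]
      obtain ⟨m, hm, hv⟩ := ih x
      refine ⟨m, hm, ?_⟩
      rw [hv]
      simp only [List.map_cons, List.foldl_cons]
      congr 1
      simp only [Bool.or_eq_true, Bool.and_eq_true, Bool.not_eq_true', decide_eq_true_eq,
        decide_eq_false_iff_not] at hcond
      omega
    · rw [if_neg hcond]
      obtain ⟨m, hm, hv⟩ := ih c
      refine ⟨m, hm, ?_⟩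
      rw [hv]
      simp only [List.map_cons, List.foldl_cons]
      congr 1
      simp only [Bool.or_eq_true, Bool.and_eq_true, Bool.not_eq_true', decide_eq_true_eq,
        decide_eq_false_iff_not, not_or, not_and] at hcond
      omega

-- the while-loop of A: pop the front; if it is the max, count it (and stop on the
-- target, flag l == 1), otherwise append it back.  max_value = max(q)[0] is inlined
-- into its single live use; A's re-assignment of max_value inside the taken branch is
-- dead (recomputed at the top of the next iteration).
def solLoopA (q : List (Int × Int)) (answer : Int) : Int :=
  match q with
  | [] => answer
  | (curr, l) :: rest =>
    if h : curr = ((PySem.List.max2? ((curr, l) :: rest) Prod.fst Prod.snd).getD (curr, l)).1 then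
      if l = 1 then answer + 1
      else solLoopA rest (answer + 1)
    else solLoopA (rest ++ [(curr, l)]) answer
termination_by qMeasure (q.map Prod.fst)
decreasing_by
  · simpa using qMeasure_tail_lt curr (rest.map Prod.fst)
  · obtain ⟨m, hm, hv⟩ := max2_fst rest (curr, l)
    rw [hm] at h
    simp only [Option.getD_some, hv] at h
    have hle := (PySem.List.le_foldl_max (rest.map Prod.fst) curr).1
    have hlt : curr < (rest.map Prod.fst).foldl max curr := lt_of_le_of_ne hle h
    simpa using qMeasure_rot_lt curr (rest.map Prod.fst) hlt

def solution (priorities : List Int) (location : Int) : Int :=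
  -- q = deque of (priority, flag) with flag 1 exactly at index == location
  let q : List (Int × Int) :=
    (PySem.List.enumerate priorities).map
      (fun iv => if iv.1 = location then (iv.2, (1 : Int)) else (iv.2, (0 : Int)))
  if q.length = 1 then 1 else solLoopA q 0

-- ===== PORT B =====
-- B's while-q loop; fuel only makes it total (one unit per iteration; solution_alt
-- supplies qMeasure priorities + 1, which the loop never exhausts on inputs in Pre_).
def solLoopB (fuel : Nat) (q : List (Int × Bool)) (order : List Int) (k : Nat) : Int :=
  match fuel with
  | 0 => 0
  | fuel + 1 =>
    match q with
    | [] => (k : Int)        -- queue drained without hitting the target: return k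
    | (p, isTarget) :: rest =>
      match order[k]? with   -- order[k]; k ≥ 0 always, so plain Nat indexing is exact
      | none => 0            -- IndexError; unreachable: k < len(order) while q is nonempty
      | some m =>
        if p = m then
          (if isTarget then ((k : Int) + 1) else solLoopB fuel rest order (k + 1))
        else solLoopB fuel (rest ++ [(p, isTarget)]) order k

def solution_alt (priorities : List Int) (location : Int) : Int :=
  let order := PySem.List.sorted priorities (fun x => x) true
  let q : List (Int × Bool) :=
    (PySem.List.enumerate priorities).map (fun ip => (ip.2, decide (ip.1 = location)))
  solLoopB (qMeasure priorities + 1) q order 0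

-- ===== PRECONDITION & SPEC =====
def Spec_solution (priorities : List Int) (location : Int) (out : Int) : Prop := out = solution_alt priorities location
instance (priorities : List Int) (location : Int) (out : Int) : Decidable (Spec_solution priorities location out) := by unfold Spec_solution; infer_instance

-- ===== CLAIM (what is proved, stated in full; the proofs are below) =====
def Claim_equal_solution : Prop := ∀ (priorities : List Int) (location : Int), Dom_solution priorities location → Spec_solution priorities location (solution priorities location)

-- ===== LEMMAS AND PROOFS =====

-- A's queue is B's queue with flags 1/0 instead of true/false
def toA (q : List (Int × Bool)) : List (Int × Int) :=
  q.map (fun p => (p.1, if p.2 then (1 : Int) else 0))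

theorem toA_fst (q : List (Int × Bool)) : (toA q).map Prod.fst = q.map Prod.fst := by
  simp [toA, List.map_map, Function.comp]

theorem foldl_max_eq_of_perm (a x : Int) (l t : List Int)
    (hperm : (a :: l).Perm (x :: t)) (hx : ∀ y ∈ t, y ≤ x) :
    l.foldl max a = x := by
  have hmem : l.foldl max a ∈ a :: l := by
    rcases PySem.List.foldl_max_mem l a with h | h
    · rw [h]; exact List.mem_cons_self
    · exact List.mem_cons_of_mem _ h
  have hub : l.foldl max a ≤ x := by
    have := hperm.mem_iff.mp hmem
    rcases List.mem_cons.mp this with h | h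
    · omega
    · exact hx _ h
  have hlb : x ≤ l.foldl max a := by
    have hxin : x ∈ a :: l := hperm.mem_iff.mpr List.mem_cons_self
    rcases List.mem_cons.mp hxin with h | h
    · rw [h]; exact (PySem.List.le_foldl_max l a).1
    · exact (PySem.List.le_foldl_max l a).2 _ h
  omega

theorem lockstep : ∀ (n : Nat) (qB : List (Int × Bool)) (order : List Int) (k : Nat) (answer : Int),
    qMeasure (qB.map Prod.fst) < n →
    List.Pairwise (fun a b => b ≤ a) order →
    (qB.map Prod.fst).Perm (order.drop k) →
    solLoopA (toA qB) answer = solLoopB n qB order k + answer - (k : Int) := by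
  intro n
  induction n with
  | zero => intro qB order k answer hm _ _; exact absurd hm (Nat.not_lt_zero _)
  | succ n ih =>
    intro qB order k answer hm horder hperm
    rcases qB with _ | ⟨⟨c, b⟩, rest⟩
    · rw [solLoopB]
      simp only [toA, List.map_nil, solLoopA]
      ring
    · rw [show ((c, b) :: rest).map Prod.fst = c :: rest.map Prod.fst from rfl] at hperm hm
      have hne : order.drop k ≠ [] := by
        intro h0
        rw [h0] at hperm
        exact List.cons_ne_nil _ _ hperm.eq_nil
      have hk : k < order.length := by
        by_contra hge
        exact hne (List.drop_eq_nil_of_le (by omega))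
      have hdrop : order.drop k = order[k] :: order.drop (k + 1) := List.drop_eq_getElem_cons hk
      have hperm' : (c :: rest.map Prod.fst).Perm (order[k] :: order.drop (k + 1)) := by
        rw [← hdrop]; exact hperm
      have hub : ∀ y ∈ order.drop (k + 1), y ≤ order[k] := by
        have hpd : (order.drop k).Pairwise (fun a b => b ≤ a) := horder.drop
        rw [hdrop] at hpd
        exact fun y hy => List.rel_of_pairwise_cons hpd hy
      have hmax : (rest.map Prod.fst).foldl max c = order[k] :=
        foldl_max_eq_of_perm c order[k] (rest.map Prod.fst) (order.drop (k + 1)) hperm' hub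
      obtain ⟨m, hm2, hv⟩ := max2_fst (toA rest) (c, if b then (1 : Int) else 0)
      rw [toA_fst] at hv
      have hv' : m.1 = order[k] := by rw [hv]; exact hmax
      have hget : order[k]? = some order[k] := List.getElem?_eq_getElem hk
      have hAeq : toA ((c, b) :: rest) = (c, if b then (1 : Int) else 0) :: toA rest := rfl
      rw [hAeq]
      rw [solLoopA]
      rw [hm2]
      simp only [Option.getD_some, hv']
      by_cases hc : c = order[k]
      · rw [dif_pos hc]
        cases b with
        | true =>
          rw [solLoopB]
          simp only [hget, if_pos hc]
          push_cast
          ring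
        | false =>
          simp only [Bool.false_eq_true, if_false]
          rw [if_neg (by norm_num : ¬ (0 : Int) = 1)]
          have hperm2 : (rest.map Prod.fst).Perm (order.drop (k + 1)) := by
            rw [hc] at hperm'
            exact hperm'.cons_inv
          have hmlt : qMeasure (rest.map Prod.fst) < n := by
            have := qMeasure_tail_lt c (rest.map Prod.fst)
            omega
          have hIH := ih rest order (k + 1) (answer + 1) hmlt horder hperm2
          rw [hIH, solLoopB]
          simp only [hget, if_pos hc, Bool.false_eq_true, if_false]
          push_cast
          ring
      · rw [dif_neg hc]
        have hAapp : toA rest ++ [(c, if b then (1 : Int) else 0)] = toA (rest ++ [(c, b)]) := by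
          simp [toA]
        rw [hAapp]
        have hclt : c < (rest.map Prod.fst).foldl max c :=
          lt_of_le_of_ne (PySem.List.le_foldl_max (rest.map Prod.fst) c).1 (by rw [hmax]; exact hc)
        have hmlt : qMeasure ((rest ++ [(c, b)]).map Prod.fst) < n := by
          have h1 : (rest ++ [(c, b)]).map Prod.fst = rest.map Prod.fst ++ [c] := by simp
          rw [h1]
          have := qMeasure_rot_lt c (rest.map Prod.fst) hclt
          omega
        have hperm2 : ((rest ++ [(c, b)]).map Prod.fst).Perm (order.drop k) := by
          have h1 : (rest ++ [(c, b)]).map Prod.fst = rest.map Prod.fst ++ [c] := by simp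
          rw [h1]
          exact (List.perm_append_singleton c (rest.map Prod.fst)).trans hperm
        have hIH := ih (rest ++ [(c, b)]) order k answer hmlt horder hperm2
        rw [hIH, solLoopB]
        simp only [hget, if_neg hc]

-- ===== VERDICT (by name: the statement is the Claim_ definition above) =====
theorem solution_spec : Claim_equal_solution := by
  intro priorities location _hdom
  unfold Spec_solution solution solution_alt
  by_cases hlen1 : priorities.length = 1
  · -- A's len(q) == 1 shortcut: B executes the single process first either way
    obtain ⟨a, ha⟩ := List.length_eq_one_iff.mp hlen1
    subst ha
    have hsort : PySem.List.sorted [a] (fun x => x) true = [a] :=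
      PySem.List.sorted_rev_eq_of_perm_of_pairwise_gt [a] [a] (fun x => x) (List.Perm.refl _)
        (by simp)
    by_cases h : (0 : Int) = location <;>
      simp [PySem.List.enumerate_cons, PySem.List.enumerate_nil, hsort, h, solLoopB,
        qMeasure, firstMaxIdx]
  · have hqfst : ((PySem.List.enumerate priorities).map
        (fun ip => (ip.2, decide (ip.1 = location)))).map Prod.fst = priorities := by
      rw [List.map_map]
      exact PySem.List.map_snd_enumerate priorities 0
    have hAq : (PySem.List.enumerate priorities).map
          (fun iv => if iv.1 = location then (iv.2, (1 : Int)) else (iv.2, (0 : Int)))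
        = toA ((PySem.List.enumerate priorities).map
            (fun ip => (ip.2, decide (ip.1 = location)))) := by
      rw [toA, List.map_map]
      refine List.map_congr_left fun ip _ => ?_
      by_cases h : ip.1 = location <;> simp [h]
    have hqlen : ((PySem.List.enumerate priorities).map
        (fun iv => if iv.1 = location then (iv.2, (1 : Int)) else (iv.2, (0 : Int)))).length
        = priorities.length := by
      simp [PySem.List.length_enumerate]
    rw [if_neg (by rw [hqlen]; exact hlen1)]
    rw [hAq]
    have hord : List.Pairwise (fun a b => b ≤ a)
        (PySem.List.sorted priorities (fun x => x) true) :=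
      PySem.List.sorted_pairwise_rev priorities (fun x => x)
    have hperm0 : (((PySem.List.enumerate priorities).map
          (fun ip => (ip.2, decide (ip.1 = location)))).map Prod.fst).Perm
        ((PySem.List.sorted priorities (fun x => x) true).drop 0) := by
      rw [hqfst, List.drop_zero]
      exact (PySem.List.sorted_perm priorities (fun x => x) true).symm
    have hmeas : qMeasure (((PySem.List.enumerate priorities).map
        (fun ip => (ip.2, decide (ip.1 = location)))).map Prod.fst)
        < qMeasure priorities + 1 := by
      rw [hqfst]; omega
    have h := lockstep (qMeasure priorities + 1)
      ((PySem.List.enumerate priorities).map (fun ip => (ip.2, decide (ip.1 = location))))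
      (PySem.List.sorted priorities (fun x => x) true) 0 0 hmeas hord hperm0
    rw [h]
    push_cast
    ring
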